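-- pv_equiv track=rewrite | github.com/y2kbugger/tangle | src/main.py | maximise
-- ===== SOURCE A (Python) =====
-- from collections import deque
--
-- def dnatoint(x):
--     # http://pastebin.com/x1FEP9gY
--     y = 0
--     for i,j in enumerate(x):
--         if j: y += int(j)<<i
--     return y
--
-- def maximise(dna):
--     maxval = 0
--     maxdna = dna
--     dnadeque = deque(dna)
--     for i in dna:
--         dnadeque.rotate(1)
--         val = dnatoint(dnadeque)
--         if val>maxval:
--             maxval=val
--             maxdna = tuple(dnadeque)
--     return maxdna
-- ===== SOURCE B (Python) =====
-- def maximise(dna):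
--     n = len(dna)
--     v = sum(a << i for i, a in enumerate(dna))  # value of the unrotated sequence
--     m = (1 << n) - 1
--     best_val = 0
--     best_k = 0
--     for k in range(1, n + 1):
--         # rotating right by one: v_k = 2*v_{k-1} - last*(2^n - 1)
--         v = 2 * v - dna[n - k] * m
--         if v > best_val:
--             best_val = v
--             best_k = k
--     if best_k == 0:
--         return dna
--     return tuple(dna[n - best_k:] + dna[:n - best_k])
-- ===== Notes on version B (the rewrite author's own statement) =====
-- stated objective: faster
-- what changed: Instead of re-evaluating dnatoint on every rotation (n evaluations of an n-term sum), B updates the rotation's value in O(1) arithmetic steps via the recurrence v' = 2*v - last*(2^n - 1), tracks only the best rotation index, and rebuilds the winning rotation once at the end by slicing.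
import Mathlib
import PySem

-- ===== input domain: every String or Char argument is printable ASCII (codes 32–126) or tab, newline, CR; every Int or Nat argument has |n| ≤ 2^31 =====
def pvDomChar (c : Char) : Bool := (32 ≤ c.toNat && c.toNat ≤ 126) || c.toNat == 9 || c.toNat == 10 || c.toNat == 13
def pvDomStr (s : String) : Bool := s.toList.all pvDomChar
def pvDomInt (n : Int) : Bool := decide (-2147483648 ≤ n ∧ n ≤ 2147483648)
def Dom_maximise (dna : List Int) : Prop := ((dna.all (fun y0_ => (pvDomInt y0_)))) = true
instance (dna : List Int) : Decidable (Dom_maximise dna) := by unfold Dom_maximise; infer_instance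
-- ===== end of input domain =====

-- B replaces A's per-rotation O(n) revaluation by an O(1) recurrence on the rotation value
-- (one pass, then the best rotation is rebuilt by slicing); objective: faster.
-- A returns the input list itself when no rotation value exceeds 0 and a rotated copy otherwise
-- (in Python a tuple vs a list; both are List Int here) — B reproduces that exactly.

-- ===== PORT A =====
-- helper: y = 0; for i,j in enumerate(x): if j: y += int(j)<<i
def dnatoint (x : List Int) : Int :=
  (PySem.List.enumerate x).foldl
    (fun y ij => if ij.2 ≠ 0 then y + ij.2 * 2 ^ ij.1.toNat else y) 0

-- deque.rotate(1): last element moves to the front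
def rotate1 (l : List Int) : List Int :=
  l.drop (l.length - 1) ++ l.take (l.length - 1)

def maximise (dna : List Int) : List Int :=
  (dna.foldl
    (fun (st : Int × List Int × List Int) (_i : Int) =>
      let d := rotate1 st.2.2
      let val := dnatoint d
      if val > st.1 then (val, d, d) else (st.1, st.2.1, d))
    (0, dna, dna)).2.1

-- ===== PORT B =====
def maximise_alt (dna : List Int) : List Int :=
  let n : Nat := dna.length
  let v0 : Int := ((PySem.List.enumerate dna).map (fun ia => ia.2 * 2 ^ ia.1.toNat)).sum
  let m : Int := 2 ^ n - 1
  let fin :=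
    (PySem.List.pyRange 1 ((n : Int) + 1) 1).foldl
      (fun (st : Int × Int × Int) (k : Int) =>
        let v := 2 * st.1 - PySem.List.pyGetD dna ((n : Int) - k) 0 * m
        if v > st.2.1 then (v, v, k) else (v, st.2.1, st.2.2))
      (v0, 0, 0)
  if fin.2.2 = 0 then dna
  else PySem.List.slice dna (some ((n : Int) - fin.2.2)) none ++
       PySem.List.slice dna none (some ((n : Int) - fin.2.2))

-- ===== PRECONDITION & SPEC =====
def Spec_maximise (dna : List Int) (out : List Int) : Prop := out = maximise_alt dna
instance (dna : List Int) (out : List Int) : Decidable (Spec_maximise dna out) := by unfold Spec_maximise; infer_instance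

-- ===== CLAIM (what is proved, stated in full; the proofs are below) =====
def Claim_equal_maximise : Prop := ∀ (dna : List Int), Dom_maximise dna → Spec_maximise dna (maximise dna)

-- ===== LEMMAS AND PROOFS =====

-- mathematical value of a sequence: dval l = l[0] + 2*l[1] + 4*l[2] + ...
def dval : List Int → Int
  | [] => 0
  | a :: t => a + 2 * dval t

-- the rotation after k right-rotations by one
def rotK (dna : List Int) (k : Nat) : List Int :=
  dna.drop (dna.length - k) ++ dna.take (dna.length - k)

-- B's final reconstruction step, as a named function of the fold state
def finB (dna : List Int) (st : Int × Int × Int) : List Int :=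
  if st.2.2 = 0 then dna
  else PySem.List.slice dna (some ((dna.length : Int) - st.2.2)) none ++
       PySem.List.slice dna none (some ((dna.length : Int) - st.2.2))

-- A's loop body as a pure step (the folded element is ignored)
def stepA (st : Int × List Int × List Int) : Int × List Int × List Int :=
  let d := rotate1 st.2.2
  let val := dnatoint d
  if val > st.1 then (val, d, d) else (st.1, st.2.1, d)

def iterA : Nat → (Int × List Int × List Int) → (Int × List Int × List Int)
  | 0, st => st
  | m + 1, st => iterA m (stepA st)

theorem foldl_ignore_eq_iterA (l : List Int) (st : Int × List Int × List Int) :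
    l.foldl
      (fun (st : Int × List Int × List Int) (_i : Int) =>
        let d := rotate1 st.2.2
        let val := dnatoint d
        if val > st.1 then (val, d, d) else (st.1, st.2.1, d)) st
    = iterA l.length st := by
  induction l generalizing st with
  | nil => rfl
  | cons a t ih => simpa [iterA, stepA] using ih _

theorem dval_append_singleton (l : List Int) (L : Int) :
    dval (l ++ [L]) = dval l + L * 2 ^ l.length := by
  induction l with
  | nil => simp [dval]
  | cons a t ih => simp [dval, ih, pow_succ]; ring

theorem dnatoint_enum (xs : List Int) (s : Nat) (y : Int) :
    (PySem.List.enumerate xs (s : Int)).foldl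
      (fun y ij => if ij.2 ≠ 0 then y + ij.2 * 2 ^ ij.1.toNat else y) y
    = y + 2 ^ s * dval xs := by
  induction xs generalizing s y with
  | nil => simp [PySem.List.enumerate_nil, dval]
  | cons a t ih =>
    rw [PySem.List.enumerate_cons]
    have hc : ((s : Int) + 1) = ((s + 1 : Nat) : Int) := by push_cast; ring
    rw [List.foldl_cons, hc, ih]
    by_cases h : a = 0 <;> simp [h, dval, pow_succ] <;> ring

theorem dnatoint_eq (l : List Int) : dnatoint l = dval l := by
  have h := dnatoint_enum l 0 0
  simpa [dnatoint] using h

theorem sum_enum (xs : List Int) (s : Nat) :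
    ((PySem.List.enumerate xs (s : Int)).map (fun ia => ia.2 * 2 ^ ia.1.toNat)).sum
    = 2 ^ s * dval xs := by
  induction xs generalizing s with
  | nil => simp [PySem.List.enumerate_nil, dval]
  | cons a t ih =>
    rw [PySem.List.enumerate_cons]
    have hc : ((s : Int) + 1) = ((s + 1 : Nat) : Int) := by push_cast; ring
    rw [List.map_cons, List.sum_cons, hc, ih]
    simp [dval, pow_succ]; ring

theorem rotK_zero (dna : List Int) : rotK dna 0 = dna := by
  simp [rotK]

-- decomposition of consecutive rotations around the pivot element dna[n-k-1]
theorem rotK_decomp (dna : List Int) (k : Nat) (h : k < dna.length) :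
    rotK dna k = (dna.drop (dna.length - k) ++ dna.take (dna.length - k - 1))
                   ++ [dna.getD (dna.length - k - 1) 0] ∧
    rotK dna (k + 1) = dna.getD (dna.length - k - 1) 0 ::
                   (dna.drop (dna.length - k) ++ dna.take (dna.length - k - 1)) := by
  have h1 : dna.length - k - 1 < dna.length := by omega
  have hget : dna.getD (dna.length - k - 1) 0 = dna[dna.length - k - 1]'h1 := by
    rw [List.getD_eq_getElem?_getD, List.getElem?_eq_getElem h1]; rfl
  have e : dna.length - k - 1 + 1 = dna.length - k := by omega
  constructor
  · have htake : dna.take (dna.length - k)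
        = dna.take (dna.length - k - 1) ++ [dna.getD (dna.length - k - 1) 0] := by
      conv_lhs => rw [show dna.length - k = (dna.length - k - 1) + 1 from by omega]
      rw [List.take_add_one, List.getElem?_eq_getElem h1, hget]
      rfl
    rw [rotK, htake, ← List.append_assoc]
  · rw [rotK, show dna.length - (k + 1) = dna.length - k - 1 from by omega,
      List.drop_eq_getElem_cons h1, e, ← hget, List.cons_append]

theorem rotate1_snoc (xs : List Int) (x : Int) : rotate1 (xs ++ [x]) = x :: xs := by
  simp [rotate1]

theorem rotate1_rotK (dna : List Int) (k : Nat) (h : k < dna.length) :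
    rotate1 (rotK dna k) = rotK dna (k + 1) := by
  obtain ⟨h1, h2⟩ := rotK_decomp dna k h
  rw [h1, rotate1_snoc, h2]

-- the value recurrence: one right-rotation doubles the value and corrects for the moved element
theorem dval_rotK_succ (dna : List Int) (k : Nat) (h : k < dna.length) :
    dval (rotK dna (k + 1))
    = 2 * dval (rotK dna k) - dna.getD (dna.length - k - 1) 0 * (2 ^ dna.length - 1) := by
  obtain ⟨h1, h2⟩ := rotK_decomp dna k h
  have hlen : (dna.drop (dna.length - k) ++ dna.take (dna.length - k - 1)).length
      = dna.length - 1 := by simp; omega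
  have hpow : (2 : Int) ^ dna.length = 2 ^ (dna.length - 1) * 2 := by
    conv_lhs => rw [show dna.length = (dna.length - 1) + 1 from by omega]
    rw [pow_succ]
  rw [h1, h2, dval, dval_append_singleton, hlen, hpow]
  ring

-- main invariant: after k0 steps with matching states, the two loops produce the same result
theorem main_inv (dna : List Int) (j : Nat) : ∀ (k0 : Nat), j + k0 = dna.length →
    ∀ (mv : Int) (md : List Int) (bk : Int), 0 ≤ bk → bk.toNat ≤ k0 →
    md = (if bk = 0 then dna else rotK dna bk.toNat) →
    (iterA j (mv, md, rotK dna k0)).2.1 =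
      finB dna
        ((PySem.List.pyRange ((k0 : Int) + 1) ((dna.length : Int) + 1) 1).foldl
          (fun (st : Int × Int × Int) (k : Int) =>
            let v := 2 * st.1 -
              PySem.List.pyGetD dna ((dna.length : Int) - k) 0 * (2 ^ dna.length - 1)
            if v > st.2.1 then (v, v, k) else (v, st.2.1, st.2.2))
          (dval (rotK dna k0), mv, bk)) := by
  induction j with
  | zero =>
    intro k0 hk mv md bk hbk0 hbkle hmd
    have hnil : PySem.List.pyRange ((k0 : Int) + 1) ((dna.length : Int) + 1) 1 = [] := by
      rw [PySem.List.pyRange_one]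
      simp
      omega
    rw [hnil, List.foldl_nil]
    show md = finB dna (dval (rotK dna k0), mv, bk)
    by_cases hz : bk = 0
    · simp [hz, hmd, finB]
    · have hd : ((dna.length : Int) - bk) = ((dna.length - bk.toNat : Nat) : Int) := by omega
      rw [hmd, if_neg hz]
      rw [finB]
      simp only [hz, if_false, hd, PySem.List.slice_from_natCast, PySem.List.slice_to_natCast]
      rfl
  | succ j ih =>
    intro k0 hk mv md bk hbk0 hbkle hmd
    have hlt : k0 < dna.length := by omega
    have hcons : PySem.List.pyRange ((k0 : Int) + 1) ((dna.length : Int) + 1) 1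
        = ((k0 : Int) + 1) :: PySem.List.pyRange (((k0 : Int) + 1) + 1) ((dna.length : Int) + 1) 1 :=
      PySem.List.pyRange_one_cons (by omega)
    have hidx : PySem.List.pyGetD dna ((dna.length : Int) - ((k0 : Int) + 1)) 0
        = dna.getD (dna.length - k0 - 1) 0 := by
      rw [show (dna.length : Int) - ((k0 : Int) + 1) = ((dna.length - k0 - 1 : Nat) : Int) from by
        omega, PySem.List.pyGetD_natCast]
    rw [hcons, List.foldl_cons]
    show (iterA j (stepA (mv, md, rotK dna k0))).2.1 = _
    rw [stepA]
    dsimp only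
    rw [rotate1_rotK dna k0 hlt, dnatoint_eq, hidx]
    have hrec := dval_rotK_succ dna k0 hlt
    set v := 2 * dval (rotK dna k0) - dna.getD (dna.length - k0 - 1) 0 * (2 ^ dna.length - 1)
      with hv
    rw [hrec]
    have hc2 : ((k0 : Int) + 1) + 1 = (((k0 + 1 : Nat) : Int)) + 1 := by push_cast; ring
    rw [hc2]
    by_cases hc : v > mv
    · rw [if_pos hc, if_pos hc]
      have hmd' : rotK dna (k0 + 1)
          = (if ((k0 : Int) + 1) = 0 then dna else rotK dna ((k0 : Int) + 1).toNat) := by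
        rw [if_neg (by omega), show ((k0 : Int) + 1).toNat = k0 + 1 from by omega]
      have h := ih (k0 + 1) (by omega) v (rotK dna (k0 + 1)) ((k0 : Int) + 1)
        (by omega) (by omega) hmd'
      rw [hrec] at h
      exact h
    · rw [if_neg hc, if_neg hc]
      have h := ih (k0 + 1) (by omega) mv md bk hbk0 (by omega) hmd
      rw [hrec] at h
      exact h

-- ===== VERDICT (by name: the statement is the Claim_ definition above) =====
theorem maximise_spec : Claim_equal_maximise := by
  intro dna _hdom
  unfold Spec_maximise maximise maximise_alt
  rw [foldl_ignore_eq_iterA]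
  have hv0 : ((PySem.List.enumerate dna).map (fun ia => ia.2 * 2 ^ ia.1.toNat)).sum
      = dval dna := by
    have h := sum_enum dna 0
    simpa using h
  have h := main_inv dna dna.length 0 (by omega) 0 dna 0 (by omega) (by omega) (by simp)
  rw [rotK_zero, show (((0 : Nat) : Int) + 1) = (1 : Int) from by norm_num] at h
  simp only [finB] at h
  simp only [hv0]
  exact h
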